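-- pv_equiv track=rewrite | github.com/Lynguyen237/practice_probs | pixelLonely.py | pixelLonely
-- ===== SOURCE A (Python) =====
-- def pixelLonely(grid):
--   rowMap = {}
--   colMap = {}
--
--   for r in range(len(grid)):
--     for c in range(len(grid[0])):
--       if grid[r][c] == 1:
--         rowMap[r] = rowMap.get(r, 0) + 1
--         colMap[c] = colMap.get(c, 0) + 1
--
--   ans = []
--   for row, count in rowMap.items(): #0
--     if count == 1: #1
--       for col in range(len(grid[0])):
--         if grid[row][col] == 1 and colMap[col] == 1:
--             ans.append((row,col))
--
--   return ans
-- ===== SOURCE B (Python) =====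
-- def pixelLonely(grid):
--   if not grid:
--     return []
--   w = len(grid[0])
--   ones = [(r, c) for r in range(len(grid)) for c in range(w) if grid[r][c] == 1]
--   rows = [r for (r, _) in ones]
--   cols = [c for (_, c) in ones]
--   return [(r, c) for (r, c) in ones if rows.count(r) == 1 and cols.count(c) == 1]
-- ===== Notes on version B (the rewrite author's own statement) =====
-- stated objective: simpler
-- what changed: B drops both dicts and the second nested grid scan: it collects the 1-positions once in row-major order and filters that list by the row/column multiplicity of each position.
import Mathlib
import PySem

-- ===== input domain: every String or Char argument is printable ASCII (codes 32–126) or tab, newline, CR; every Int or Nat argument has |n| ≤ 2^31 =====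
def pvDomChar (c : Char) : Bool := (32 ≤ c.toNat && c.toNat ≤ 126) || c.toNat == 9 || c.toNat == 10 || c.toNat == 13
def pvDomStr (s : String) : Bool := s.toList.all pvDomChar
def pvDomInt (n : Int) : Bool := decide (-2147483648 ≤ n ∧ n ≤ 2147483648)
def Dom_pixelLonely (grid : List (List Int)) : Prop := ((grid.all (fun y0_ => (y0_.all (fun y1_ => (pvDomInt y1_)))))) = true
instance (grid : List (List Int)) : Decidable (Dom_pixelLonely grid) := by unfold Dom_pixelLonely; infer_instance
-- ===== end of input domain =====

-- B replaces A's two dicts and second nested grid scan by one row-major list of the 1-positions,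
-- filtered by row/column multiplicity (objective: simpler; same cost, not claimed faster).


-- ===== PORT A =====
-- grid[0] / grid[r][c] are ported with pyGetD; exact on Pre_ (every row at least len(grid[0])
-- long), where every index Python performs is in range (on [] no index is ever evaluated).
-- colMap[col] is ported with getD 0; exact because that lookup only runs when
-- grid[row][col]==1, so col was counted.
def pixelLonely (grid : List (List Int)) : List (Int × Int) :=
  let w : Int := PySem.List.len (PySem.List.pyGetD grid 0 [])
  let maps :=
    (PySem.List.pyRange 0 (PySem.List.len grid) 1).foldl
      (fun (ms : PySem.Dict Int Int × PySem.Dict Int Int) r =>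
        (PySem.List.pyRange 0 w 1).foldl
          (fun ms c =>
            if PySem.List.pyGetD (PySem.List.pyGetD grid r []) c 0 == 1 then
              (ms.1.insert r (ms.1.getD r 0 + 1), ms.2.insert c (ms.2.getD c 0 + 1))
            else ms) ms)
      (PySem.Dict.empty, PySem.Dict.empty)
  let rowMap := maps.1
  let colMap := maps.2
  rowMap.items.foldl
    (fun ans rc =>
      if rc.2 == (1 : Int) then
        (PySem.List.pyRange 0 w 1).foldl
          (fun ans col =>
            if (PySem.List.pyGetD (PySem.List.pyGetD grid rc.1 []) col 0 == 1)
                && (colMap.getD col 0 == (1 : Int)) then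
              ans ++ [(rc.1, col)]
            else ans) ans
      else ans) []

-- ===== PORT B =====
def pixelLonely_alt (grid : List (List Int)) : List (Int × Int) :=
  if grid = [] then []
  else
    let w : Int := PySem.List.len (PySem.List.pyGetD grid 0 [])
    let ones : List (Int × Int) :=
      (PySem.List.pyRange 0 (PySem.List.len grid) 1).flatMap (fun r =>
        ((PySem.List.pyRange 0 w 1).filter
            (fun c => PySem.List.pyGetD (PySem.List.pyGetD grid r []) c 0 == 1)).map
          (fun c => (r, c)))
    let rows := ones.map (·.1)
    let cols := ones.map (·.2)
    ones.filter (fun rc => (rows.count rc.1 == 1) && (cols.count rc.2 == 1))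

-- ===== PRECONDITION & SPEC =====
-- Pre_ = exactly where A returns: on a nonempty grid every row must be at least len(grid[0])
-- long (else grid[r][c] raises IndexError); on the empty grid A returns [] (no loop iteration).
def Pre_pixelLonely (grid : List (List Int)) : Prop :=
  match grid with
  | [] => True
  | g0 :: _ => ∀ row ∈ grid, g0.length ≤ row.length
instance (grid : List (List Int)) : Decidable (Pre_pixelLonely grid) := by
  unfold Pre_pixelLonely; cases grid <;> infer_instance
def pvWitness_pixelLonely : List (List Int) := [[1, 0], [0, 1]]

def Spec_pixelLonely (grid : List (List Int)) (out : List (Int × Int)) : Prop := out = pixelLonely_alt grid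
instance (grid : List (List Int)) (out : List (Int × Int)) : Decidable (Spec_pixelLonely grid out) := by unfold Spec_pixelLonely; infer_instance

-- ===== CLAIM (what is proved, stated in full; the proofs are below) =====
def Claim_equal_pixelLonely : Prop := ∀ (grid : List (List Int)), Dom_pixelLonely grid → Pre_pixelLonely grid → Spec_pixelLonely grid (pixelLonely grid)

-- ===== LEMMAS AND PROOFS =====

-- A fold over a flatMap is the nested fold (A's double counting loop).
theorem pvFoldlFlatMap {α β γ : Type} (l : List α) (g : α → List β) (f : γ → β → γ) (init : γ) :
    (l.flatMap g).foldl f init = l.foldl (fun acc x => (g x).foldl f acc) init := by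
  induction l generalizing init with
  | nil => rfl
  | cons a t ih => simp [List.foldl_append, ih]

theorem pvFlatMapCongr {α β : Type} (l : List α) (f g : α → List β)
    (h : ∀ x ∈ l, f x = g x) : l.flatMap f = l.flatMap g := by
  induction l with
  | nil => rfl
  | cons a t ih =>
    simp only [List.flatMap_cons]
    rw [h a (List.mem_cons_self), ih (fun x hx => h x (List.mem_cons_of_mem _ hx))]

theorem pvFilterFlatMap {α β : Type} (l : List α) (p : α → Bool) (f : α → List β) :
    (l.filter p).flatMap f = l.flatMap (fun x => if p x then f x else []) := by
  induction l with
  | nil => rfl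
  | cons a t ih => by_cases h : p a <;> simp [h, ih]

theorem pvDiscardNotMem (s : PySem.Set Int) (x : Int) (h : x ∉ s) :
    PySem.Set.discard s x = s := by
  simp only [PySem.Set.discard]
  exact List.filter_eq_self.mpr (fun y hy => by simp; exact fun he => h (he ▸ hy))

theorem pvOfListReplicateAppend (n : Nat) (r : Int) (ys : List Int) (h : r ∉ ys) :
    PySem.Set.ofList (List.replicate n r ++ ys) =
      if n = 0 then PySem.Set.ofList ys else r :: PySem.Set.ofList ys := by
  induction n with
  | zero => simp
  | succ m ih =>
    rw [List.replicate_succ, List.cons_append, PySem.Set.ofList_cons, ih]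
    have hm : r ∉ PySem.Set.ofList ys := fun hr => h ((PySem.Set.mem_ofList _ _).mp hr)
    cases m with
    | zero => simp [pvDiscardNotMem _ _ hm]
    | succ k =>
      simp only [Nat.succ_ne_zero, if_false]
      have h1 : PySem.Set.discard (r :: PySem.Set.ofList ys) r = PySem.Set.discard (PySem.Set.ofList ys) r := by
        simp [PySem.Set.discard]
      rw [h1, pvDiscardNotMem _ _ hm]

theorem pvCountFlatMapRepNotMem (ri : List Int) (nn : Int → Nat) (r : Int) (hr : r ∉ ri) :
    (ri.flatMap (fun x => List.replicate (nn x) x)).count r = 0 := by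
  rw [List.count_eq_zero]
  intro hmem
  rcases List.mem_flatMap.mp hmem with ⟨x, hx, hrx⟩
  exact hr ((List.eq_of_mem_replicate hrx) ▸ hx)

theorem pvCountFlatMapRep (ri : List Int) (nn : Int → Nat) (hnd : ri.Nodup) (r : Int) (hr : r ∈ ri) :
    (ri.flatMap (fun x => List.replicate (nn x) x)).count r = nn r := by
  induction ri with
  | nil => cases hr
  | cons a t ih =>
    rcases List.nodup_cons.mp hnd with ⟨hna, hnt⟩
    simp only [List.flatMap_cons, List.count_append]
    rcases List.mem_cons.mp hr with h | h
    · subst h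
      rw [pvCountFlatMapRepNotMem t nn r hna, List.count_replicate]
      simp
    · have hra : ¬(a = r) := fun he => hna (he ▸ h)
      rw [ih hnt h, List.count_replicate]
      simp [hra]

theorem pvOfListFlatMapRep (ri : List Int) (nn : Int → Nat) (hnd : ri.Nodup) :
    PySem.Set.ofList (ri.flatMap (fun x => List.replicate (nn x) x)) =
      ri.filter (fun r => !(nn r == 0)) := by
  induction ri with
  | nil => rfl
  | cons a t ih =>
    rcases List.nodup_cons.mp hnd with ⟨hna, hnt⟩
    have hnotmem : a ∉ t.flatMap (fun x => List.replicate (nn x) x) := by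
      intro hmem
      rcases List.mem_flatMap.mp hmem with ⟨x, hx, hax⟩
      exact hna ((List.eq_of_mem_replicate hax) ▸ hx)
    simp only [List.flatMap_cons]
    rw [pvOfListReplicateAppend _ _ _ hnotmem, ih hnt]
    by_cases h : nn a = 0 <;> simp [h]

-- LHS canonicalisation: filtering the row-major pair list row by row.
theorem pvFilterPairs (ri : List Int) (g : Int → List Int) (q : Int → Bool) (cnt : Int → Bool) :
    (ri.flatMap (fun r => (g r).map (fun c => (r, c)))).filter (fun p => cnt p.1 && q p.2) =
      ri.flatMap (fun r => if cnt r then ((g r).filter q).map (fun c => (r, c)) else []) := by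
  rw [List.filter_flatMap]
  refine pvFlatMapCongr _ _ _ (fun r _ => ?_)
  rw [List.filter_map]
  simp only [Function.comp_def]
  by_cases h : cnt r
  · simp [h]
  · simp [Bool.eq_false_iff.mpr h]

-- RHS canonicalisation: A's iteration over the counter's keys equals iteration over the rows.
theorem pvFlatMapOfList (ri : List Int) (g : Int → List Int) (hnd : ri.Nodup)
    (body : Int → List (Int × Int))
    (hbody : ∀ r ∈ ri, (g r).length = 0 → body r = []) :
    (PySem.Set.ofList ((ri.flatMap (fun r => (g r).map (fun c => (r, c)))).map Prod.fst)).flatMap body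
      = ri.flatMap body := by
  have hrows : (ri.flatMap (fun r => (g r).map (fun c => (r, c)))).map Prod.fst
      = ri.flatMap (fun x => List.replicate ((fun r => (g r).length) x) x) := by
    rw [List.map_flatMap]
    exact pvFlatMapCongr _ _ _ (fun r _ => by
      simp [List.map_map, Function.comp_def, List.map_const'])
  rw [hrows, pvOfListFlatMapRep ri _ hnd, pvFilterFlatMap]
  refine pvFlatMapCongr _ _ _ (fun r hr => ?_)
  by_cases h : (g r).length = 0
  · simp [h, hbody r hr h]
  · simp [h]

def pvG (grid : List (List Int)) (r : Int) : List Int :=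
  (PySem.List.pyRange 0 (PySem.List.len (PySem.List.pyGetD grid 0 [])) 1).filter
    (fun c => PySem.List.pyGetD (PySem.List.pyGetD grid r []) c 0 == 1)

def pvOnes (grid : List (List Int)) : List (Int × Int) :=
  (PySem.List.pyRange 0 (PySem.List.len grid) 1).flatMap
    (fun r => (pvG grid r).map (fun c => (r, c)))

-- A's counting loop, named so the proof can talk about it (same term as in `pixelLonely`).
def pvMaps (grid : List (List Int)) : PySem.Dict Int Int × PySem.Dict Int Int :=
  (PySem.List.pyRange 0 (PySem.List.len grid) 1).foldl
    (fun (ms : PySem.Dict Int Int × PySem.Dict Int Int) r =>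
      (PySem.List.pyRange 0 (PySem.List.len (PySem.List.pyGetD grid 0 [])) 1).foldl
        (fun ms c =>
          if PySem.List.pyGetD (PySem.List.pyGetD grid r []) c 0 == 1 then
            (ms.1.insert r (ms.1.getD r 0 + 1), ms.2.insert c (ms.2.getD c 0 + 1))
          else ms) ms)
    (PySem.Dict.empty, PySem.Dict.empty)

theorem pvRowsEq (ri : List Int) (g : Int → List Int) :
    (ri.flatMap (fun r => (g r).map (fun c => (r, c)))).map Prod.fst
      = ri.flatMap (fun x => List.replicate (g x).length x) := by
  rw [List.map_flatMap]
  exact pvFlatMapCongr _ _ _ (fun r _ => by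
    simp [List.map_map, Function.comp_def, List.map_const'])

theorem pvCountLoop {σ : Type} (ri : List Int) (g : Int → List Int)
    (G : σ → Int → Int → σ) (init : σ) :
    ri.foldl (fun ms r => (g r).foldl (fun ms c => G ms r c) ms) init
      = (ri.flatMap (fun r => (g r).map (fun c => (r, c)))).foldl (fun ms p => G ms p.1 p.2) init := by
  rw [pvFoldlFlatMap]
  apply PySem.List.foldl_congr_mem
  intro ms r _
  rw [List.foldl_map]

theorem pvFoldlInsertFst (l : List (Int × Int)) :
    l.foldl (fun d (p : Int × Int) => d.insert p.1 (d.getD p.1 0 + 1)) PySem.Dict.empty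
      = PySem.Dict.counter (l.map Prod.fst) := by
  rw [← PySem.Dict.foldl_insert_getD_add_one_eq_counter, List.foldl_map]

theorem pvFoldlInsertSnd (l : List (Int × Int)) :
    l.foldl (fun d (p : Int × Int) => d.insert p.2 (d.getD p.2 0 + 1)) PySem.Dict.empty
      = PySem.Dict.counter (l.map Prod.snd) := by
  rw [← PySem.Dict.foldl_insert_getD_add_one_eq_counter, List.foldl_map]

theorem pvMapsEq (grid : List (List Int)) :
    pvMaps grid = (PySem.Dict.counter ((pvOnes grid).map Prod.fst),
                   PySem.Dict.counter ((pvOnes grid).map Prod.snd)) := by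
  unfold pvMaps
  simp only [PySem.List.foldl_if_eq_foldl_filter]
  rw [pvCountLoop (σ := PySem.Dict Int Int × PySem.Dict Int Int) _ _
    (fun ms r c => (ms.1.insert r (ms.1.getD r 0 + 1), ms.2.insert c (ms.2.getD c 0 + 1)))]
  rw [PySem.List.foldl_prod_mk
    (f := fun (d : PySem.Dict Int Int) (p : Int × Int) => d.insert p.1 (d.getD p.1 0 + 1))
    (g := fun (d : PySem.Dict Int Int) (p : Int × Int) => d.insert p.2 (d.getD p.2 0 + 1))]
  rw [pvFoldlInsertFst, pvFoldlInsertSnd]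
  rfl

theorem pvIfAppend {α : Type} (b : Bool) (ans F : List α) :
    (if b then ans ++ F else ans) = ans ++ (if b then F else []) := by
  cases b <;> simp

theorem pvIntNatBeq (n : Nat) : ((n : Int) == (1 : Int)) = (n == 1) := by
  by_cases h : n = 1
  · simp [h]
  · have h2 : ((n : Int)) ≠ 1 := by exact_mod_cast h
    simp [h, h2]

theorem pvFlatMapMap {α β γ : Type} (l : List α) (f : α → β) (g : β → List γ) :
    (l.map f).flatMap g = l.flatMap (fun x => g (f x)) := by
  induction l <;> simp_all

theorem pvFilterAnd {α : Type} (l : List α) (p q : α → Bool) :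
    l.filter (fun x => p x && q x) = (l.filter p).filter q := by
  induction l with
  | nil => rfl
  | cons a t ih => cases hp : p a <;> cases hq : q a <;> simp [hp, hq, ih]

-- A's result in canonical form: iterate the distinct rows of the 1-list.
theorem pvA_eq (grid : List (List Int)) :
    pixelLonely grid =
      (PySem.Set.ofList ((pvOnes grid).map Prod.fst)).flatMap
        (fun k =>
          if ((pvOnes grid).map Prod.fst).count k == 1 then
            ((pvG grid k).filter
              (fun c => ((pvOnes grid).map Prod.snd).count c == 1)).map (fun c => (k, c))
          else []) := by
  have h1 : pixelLonely grid
      = (pvMaps grid).1.items.foldl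
          (fun ans rc =>
            if rc.2 == (1 : Int) then
              (PySem.List.pyRange 0 (PySem.List.len (PySem.List.pyGetD grid 0 [])) 1).foldl
                (fun ans col =>
                  if (PySem.List.pyGetD (PySem.List.pyGetD grid rc.1 []) col 0 == 1)
                      && ((pvMaps grid).2.getD col 0 == (1 : Int)) then
                    ans ++ [(rc.1, col)]
                  else ans) ans
            else ans) [] := rfl
  rw [h1, pvMapsEq]
  dsimp only
  simp only [PySem.Dict.getD_counter, pvIntNatBeq]
  simp only [PySem.List.foldl_append_if]
  simp only [pvIfAppend]
  rw [PySem.List.foldl_append_eq_flatMap, PySem.Dict.items_counter, pvFlatMapMap]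
  simp only [List.nil_append, pvIntNatBeq]
  refine pvFlatMapCongr _ _ _ (fun k _ => ?_)
  dsimp only
  rw [pvFilterAnd]
  rfl

theorem pvB_eq (grid : List (List Int)) (hne : grid ≠ []) :
    pixelLonely_alt grid =
      (pvOnes grid).filter
        (fun rc => (((pvOnes grid).map Prod.fst).count rc.1 == 1)
          && (((pvOnes grid).map Prod.snd).count rc.2 == 1)) := by
  unfold pixelLonely_alt
  rw [if_neg hne]
  rfl

-- ===== VERDICT (by name: the statements are the Claim_ definitions above) =====
theorem pixelLonely_spec : Claim_equal_pixelLonely := by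
  intro grid _ _
  cases hg : grid with
  | nil => decide
  | cons g0 t =>
  have hne : grid ≠ [] := by rw [hg]; simp
  rw [← hg]
  show pixelLonely grid = pixelLonely_alt grid
  rw [pvA_eq, pvB_eq grid hne]
  unfold pvOnes
  have hnd : (PySem.List.pyRange 0 (PySem.List.len grid) 1).Nodup :=
    PySem.List.nodup_pyRange_one 0 (PySem.List.len grid)
  rw [pvFlatMapOfList _ (pvG grid) hnd _ (fun r hr h0 => by
    rw [pvRowsEq, pvCountFlatMapRep _ _ hnd r hr, h0]
    simp)]
  rw [← pvFilterPairs]
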